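-- pv_equiv track=rewrite | github.com/BennyJane/algorithm_mad | niuke/huawei/Q4.py | solution63
-- ===== SOURCE A (Python) =====
-- def solution63(n):
--     ans = [f"{n}={n}"]
--
--     count = 2
--
--     # 最小值不能为0， 数量count必然小于n
--     while count < n:
--         diff = sum(range(count))
--         retain = n - diff
--         if retain % count == 0 and retain > 0:
--             start = retain // count
--             tmp = [start + i for i in range(count)]
--             res = "+".join(map(str, tmp))
--             ans.append(f"{n}={res}")
--         count += 1
--     return ans
-- ===== SOURCE B (Python) =====
-- def solution63(n):
--     # Same decompositions, but the triangular number diff = 0+1+...+(count-1)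
--     # is maintained incrementally and the loop stops as soon as diff >= n,
--     # so it runs O(sqrt(n)) iterations instead of rescanning range(count) each time.
--     ans = [f"{n}={n}"]
--     count, diff = 2, 1
--     while diff < n:
--         retain = n - diff
--         if retain % count == 0:
--             start = retain // count
--             ans.append(f"{n}=" + "+".join(str(start + i) for i in range(count)))
--         diff += count
--         count += 1
--     return ans
-- ===== Notes on version B (the rewrite author's own statement) =====
-- stated objective: faster
-- what changed: B keeps the triangular sum diff as an incrementally updated accumulator and loops only while diff < n, instead of A's recomputing sum(range(count)) from scratch for every count up to n.
import Mathlib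
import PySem

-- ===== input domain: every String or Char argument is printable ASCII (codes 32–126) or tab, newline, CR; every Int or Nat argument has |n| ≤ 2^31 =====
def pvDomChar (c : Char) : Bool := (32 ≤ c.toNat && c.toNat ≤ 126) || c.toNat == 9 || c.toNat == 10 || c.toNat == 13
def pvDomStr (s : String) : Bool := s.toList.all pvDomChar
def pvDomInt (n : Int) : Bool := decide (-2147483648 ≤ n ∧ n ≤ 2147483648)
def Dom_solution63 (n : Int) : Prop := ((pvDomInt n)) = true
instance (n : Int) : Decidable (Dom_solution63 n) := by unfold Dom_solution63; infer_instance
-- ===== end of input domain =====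

-- B replaces A's per-iteration sum(range(count)) rescans by an incrementally maintained
-- triangular sum, stopping as soon as it reaches n (objective: faster).

-- ===== PORT A =====
-- diff = sum(range(count))
def solution63SumRange (count : Int) : Int :=
  (PySem.List.pyRange 0 count 1).foldl (· + ·) 0

-- f"{n}={res}" with res = "+".join(map(str, [start + i for i in range(count)]))
def solution63Line (n count start : Int) : String :=
  PySem.Int.toStr n ++ "=" ++
    PySem.Str.join "+" (((PySem.List.pyRange 0 count 1).map (fun i => start + i)).map PySem.Int.toStr)

-- the 'while count < n' loop; retain = n - diff
def solution63Go (n count : Int) (ans : List String) : List String :=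
  if _h : count < n then
    solution63Go n (count + 1)
      (if PySem.Int.mod (n - solution63SumRange count) count = 0 ∧ 0 < n - solution63SumRange count then
        ans ++ [solution63Line n count (PySem.Int.floordiv (n - solution63SumRange count) count)]
      else ans)
  else ans
termination_by (n - count).toNat
decreasing_by omega

def solution63 (n : Int) : List String :=
  solution63Go n 2 [PySem.Int.toStr n ++ "=" ++ PySem.Int.toStr n]

-- ===== PORT B =====
-- the 'while diff < n' loop; the Python loop variable count (which starts at 2 and only
-- grows) is represented as (c : Nat) + 2 so that termination on (n - diff) is evident
def solution63AltGo (n : Int) (c : Nat) (diff : Int) (ans : List String) : List String :=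
  if _h : diff < n then
    solution63AltGo n (c + 1) (diff + ((c : Int) + 2))
      (if PySem.Int.mod (n - diff) ((c : Int) + 2) = 0 then
        ans ++ [PySem.Int.toStr n ++ "=" ++
          PySem.Str.join "+" ((PySem.List.pyRange 0 ((c : Int) + 2) 1).map
            (fun i => PySem.Int.toStr (PySem.Int.floordiv (n - diff) ((c : Int) + 2) + i)))]
      else ans)
  else ans
termination_by (n - diff).toNat
decreasing_by omega

def solution63_alt (n : Int) : List String :=
  solution63AltGo n 0 1 [PySem.Int.toStr n ++ "=" ++ PySem.Int.toStr n]

-- ===== PRECONDITION & SPEC =====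
def Spec_solution63 (n : Int) (out : List String) : Prop := out = solution63_alt n
instance (n : Int) (out : List String) : Decidable (Spec_solution63 n out) := by unfold Spec_solution63; infer_instance

-- ===== CLAIM (what is proved, stated in full; the proofs are below) =====
def Claim_equal_solution63 : Prop := ∀ (n : Int), Dom_solution63 n → Spec_solution63 n (solution63 n)

-- ===== LEMMAS AND PROOFS =====

lemma sumRange_succ (c : Int) (hc : 0 ≤ c) :
    solution63SumRange (c + 1) = solution63SumRange c + c := by
  unfold solution63SumRange
  rw [PySem.List.pyRange_one_succ_right hc]
  simp

lemma sumRange_ge (c : Int) (hc : 2 ≤ c) : c - 1 ≤ solution63SumRange c := by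
  induction c, hc using Int.le_induction with
  | base => decide
  | succ m hm ih =>
      rw [sumRange_succ m (by omega)]
      omega

lemma go_idle (n count : Int) (ans : List String) (h0 : 0 ≤ count)
    (hs : n ≤ solution63SumRange count) : solution63Go n count ans = ans := by
  rw [solution63Go]
  by_cases h : count < n
  · rw [dif_pos h, if_neg (by omega)]
    exact go_idle n (count + 1) ans (by omega) (by rw [sumRange_succ count h0]; omega)
  · rw [dif_neg h]
termination_by (n - count).toNat
decreasing_by omega

lemma altGo_idle (n : Int) (c : Nat) (diff : Int) (ans : List String)
    (hd : diff = solution63SumRange ((c : Int) + 2)) (hn : n ≤ (c : Int) + 2) :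
    solution63AltGo n c diff ans = ans := by
  rw [solution63AltGo]
  by_cases h : diff < n
  · have hge : (c : Int) + 2 - 1 ≤ solution63SumRange ((c : Int) + 2) :=
      sumRange_ge _ (by omega)
    have hr1 : n - diff = 1 := by omega
    rw [dif_pos h, if_neg (by
      rw [hr1, PySem.Int.mod_eq_emod_of_pos (by omega : (0:Int) < (c : Int) + 2)]
      rw [Int.emod_eq_of_lt (by omega) (by omega)]
      omega)]
    refine altGo_idle n (c + 1) (diff + ((c : Int) + 2)) ans ?_ (by push_cast; omega)
    rw [hd]
    push_cast
    rw [show ((c : Int) + 1 + 2) = ((c : Int) + 2) + 1 by ring, sumRange_succ _ (by omega)]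
  · rw [dif_neg h]
termination_by (n - diff).toNat
decreasing_by omega

lemma line_eq (n count start : Int) :
    solution63Line n count start =
      PySem.Int.toStr n ++ "=" ++
        PySem.Str.join "+" ((PySem.List.pyRange 0 count 1).map
          (fun i => PySem.Int.toStr (start + i))) := by
  unfold solution63Line
  rw [List.map_map]
  rfl

lemma go_eq (n : Int) (c : Nat) (ans : List String) :
    solution63Go n ((c : Int) + 2) ans = solution63AltGo n c (solution63SumRange ((c : Int) + 2)) ans := by
  by_cases h1 : (c : Int) + 2 < n
  · by_cases h2 : solution63SumRange ((c : Int) + 2) < n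
    · rw [solution63Go, solution63AltGo, dif_pos h1, dif_pos h2]
      have hiff : (PySem.Int.mod (n - solution63SumRange ((c : Int) + 2)) ((c : Int) + 2) = 0 ∧
          0 < n - solution63SumRange ((c : Int) + 2)) ↔
          PySem.Int.mod (n - solution63SumRange ((c : Int) + 2)) ((c : Int) + 2) = 0 :=
        and_iff_left (by omega)
      rw [if_congr hiff (by rw [line_eq]) rfl]
      have hc1 : ((c : Int) + 2) + 1 = (((c : Nat) + 1 : Nat) : Int) + 2 := by push_cast; ring
      have hs1 : solution63SumRange ((c : Int) + 2) + ((c : Int) + 2)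
          = solution63SumRange ((((c : Nat) + 1 : Nat) : Int) + 2) := by
        rw [← hc1, ← sumRange_succ _ (by omega)]
      rw [hc1, hs1]
      exact go_eq n (c + 1) _
    · rw [solution63AltGo, dif_neg h2]
      exact go_idle n ((c : Int) + 2) ans (by omega) (by omega)
  · by_cases h2 : solution63SumRange ((c : Int) + 2) < n
    · rw [solution63Go, dif_neg h1]
      exact (altGo_idle n c _ ans rfl (by omega)).symm
    · rw [solution63Go, solution63AltGo, dif_neg h1, dif_neg h2]
termination_by (n - (c : Int)).toNat
decreasing_by omega

-- ===== VERDICT (by name: the statement is the Claim_ definition above) =====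
theorem solution63_spec : Claim_equal_solution63 := by
  intro n _
  unfold Spec_solution63 solution63 solution63_alt
  have h := go_eq n 0 [PySem.Int.toStr n ++ "=" ++ PySem.Int.toStr n]
  norm_num at h
  rw [h]
  norm_num [show solution63SumRange 2 = 1 from by decide]
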